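-- pv_equiv track=rewrite | github.com/PanchoManera/dec-image-extractor | backend/filesystems/ods1_extractor.py | parse_radix50
-- ===== SOURCE A (Python) =====
-- def parse_radix50(word):
--     """Convert 16-bit word from RADIX-50 encoding to ASCII string."""
--     if word == 0:
--         return '   '
--
--     chars = []
--     for i in range(3):
--         char_code = word % 40
--         word //= 40
--
--         if char_code == 0:
--             chars.append(' ')
--         elif 1 <= char_code <= 26:
--             chars.append(chr(ord('A') + char_code - 1))
--         elif 27 <= char_code <= 36:
--             chars.append(chr(ord('0') + char_code - 27))
--         elif char_code == 37:
--             chars.append('$')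
--         elif char_code == 38:
--             chars.append('.')
--         else:
--             chars.append('?')
--
--     return ''.join(reversed(chars))
-- ===== SOURCE B (Python) =====
-- _CHARS = ' ABCDEFGHIJKLMNOPQRSTUVWXYZ0123456789$.?'
-- # Full decode table: every one of the 40**3 RADIX-50 words, built once as the
-- # Cartesian product of the charset with itself.  A word decodes by a single
-- # modular reduction and table index (digit values repeat with period 40**3,
-- # so word % 64000 has the same three base-40 digits as word).
-- _TABLE = [a + b + c for a in _CHARS for b in _CHARS for c in _CHARS]
--
-- def parse_radix50(word):
--     """Convert 16-bit word from RADIX-50 encoding to ASCII string."""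
--     return _TABLE[word % 64000]
-- ===== Notes on version B (the rewrite author's own statement) =====
-- stated objective: alternative
-- what changed: Replaces per-digit extraction with branch-chain mapping, list accumulation, reversal and join by a precomputed 40^3-entry decode table (Cartesian product of the charset) indexed by a single word % 64000, correct because base-40 digits are periodic with period 40^3.
import Mathlib
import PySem

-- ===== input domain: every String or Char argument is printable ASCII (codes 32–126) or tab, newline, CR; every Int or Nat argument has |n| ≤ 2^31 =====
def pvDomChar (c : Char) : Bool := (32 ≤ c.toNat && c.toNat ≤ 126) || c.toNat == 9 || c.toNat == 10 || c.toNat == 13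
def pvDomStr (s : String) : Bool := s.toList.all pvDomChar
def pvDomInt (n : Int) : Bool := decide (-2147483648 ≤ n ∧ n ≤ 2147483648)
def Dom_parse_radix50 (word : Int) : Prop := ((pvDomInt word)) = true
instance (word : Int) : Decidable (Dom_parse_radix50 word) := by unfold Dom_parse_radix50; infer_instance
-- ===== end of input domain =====

-- B replaces A's per-digit extraction/branch-chain/reverse/join by a precomputed
-- 40^3-entry decode table (Cartesian product of the charset) indexed by word % 64000
-- (base-40 digits are periodic with period 40^3); a different algorithm, same cost class.

-- ===== PORT A =====
-- the if/elif chain mapping one RADIX-50 code to its character, exactly A's branches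
def pvBranchChar (char_code : Int) : String :=
  if char_code == 0 then " "
  else if 1 ≤ char_code ∧ char_code ≤ 26 then
    String.ofList [Char.ofNat (65 + (char_code - 1).toNat)]   -- chr(ord('A') + char_code - 1)
  else if 27 ≤ char_code ∧ char_code ≤ 36 then
    String.ofList [Char.ofNat (48 + (char_code - 27).toNat)]  -- chr(ord('0') + char_code - 27)
  else if char_code == 37 then "$"
  else if char_code == 38 then "."
  else "?"

def parse_radix50 (word : Int) : String :=
  if word == 0 then "   "
  else
    let st := (PySem.List.pyRange 0 3 1).foldl
      (fun (st : List String × Int) (_ : Int) =>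
        let char_code := PySem.Int.mod st.2 40
        let word' := PySem.Int.floordiv st.2 40
        (st.1 ++ [pvBranchChar char_code], word'))
      ([], word)
    PySem.Str.join "" st.1.reverse

-- ===== PORT B =====
def RAD50_CHARS : List Char := " ABCDEFGHIJKLMNOPQRSTUVWXYZ0123456789$.?".toList

-- _TABLE = [a + b + c for a in _CHARS for b in _CHARS for c in _CHARS]
def RAD50_TABLE : List String :=
  RAD50_CHARS.flatMap (fun a =>
    RAD50_CHARS.flatMap (fun b =>
      RAD50_CHARS.map (fun c => String.ofList [a, b, c])))

-- _TABLE[word % 64000]: the index is in [0, 64000) so pyGet? is always some; getD "" only totalises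
def parse_radix50_alt (word : Int) : String :=
  (PySem.List.pyGet? RAD50_TABLE (PySem.Int.mod word 64000)).getD ""

-- ===== PRECONDITION & SPEC =====
def Spec_parse_radix50 (word : Int) (out : String) : Prop := out = parse_radix50_alt word
instance (word : Int) (out : String) : Decidable (Spec_parse_radix50 word out) := by unfold Spec_parse_radix50; infer_instance

-- ===== CLAIM (what is proved, stated in full; the proofs are below) =====
def Claim_equal_parse_radix50 : Prop := ∀ (word : Int), Dom_parse_radix50 word → Spec_parse_radix50 word (parse_radix50 word)

-- ===== LEMMAS AND PROOFS =====

-- one-character lookup into the charset, used only to state the per-digit agreement lemmas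
def pvRadLookup (i : Int) : List Char :=
  match PySem.List.pyGet? RAD50_CHARS i with
  | some c => [c]
  | none => []

-- A's branch chain agrees with table lookup on every code in 0..39
theorem pvBranchChar_eq_lookup (c : Int) (h0 : 0 ≤ c) (h1 : c < 40) :
    pvBranchChar c = String.ofList (pvRadLookup c) := by
  interval_cases c <;> decide

theorem pvMod40_bounds (a : Int) : 0 ≤ PySem.Int.mod a 40 ∧ PySem.Int.mod a 40 < 40 :=
  ⟨PySem.Int.mod_nonneg a (by norm_num), PySem.Int.mod_lt a (by norm_num)⟩

-- ''.join of three one-character strings is the concatenation of their character lists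
theorem pvJoin_three (a b c : List Char) :
    PySem.Str.join "" [String.ofList a, String.ofList b, String.ofList c] =
      String.ofList (a ++ b ++ c) := by
  simp [PySem.Str.join, PySem.Chars.join_cons_cons, PySem.Chars.join_singleton]

-- indexing a flatMap whose blocks all have length L
theorem pvFlatMap_getElem? {α β : Type} (xs : List α) (f : α → List β) (L : Nat)
    (hLpos : 0 < L) (hL : ∀ a ∈ xs, (f a).length = L) (i : Nat) :
    (xs.flatMap f)[i]? = (xs[i / L]?).bind (fun a => (f a)[i % L]?) := by
  induction xs generalizing i with
  | nil => simp
  | cons x xs ih =>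
    have hx : (f x).length = L := hL x (List.mem_cons_self)
    rw [List.flatMap_cons]
    by_cases h : i < L
    · rw [List.getElem?_append_left (by omega)]
      have h0 : i / L = 0 := Nat.div_eq_of_lt h
      have h1 : i % L = i := Nat.mod_eq_of_lt h
      rw [h0, h1, List.getElem?_cons_zero, Option.bind_some,
        List.getElem?_eq_getElem (by omega)]
    · obtain ⟨j, rfl⟩ := Nat.exists_eq_add_of_le (Nat.not_lt.mp h)
      rw [List.getElem?_append_right (by omega), hx]
      have he : L + j - L = j := by omega
      rw [he, ih (fun a ha => hL a (List.mem_cons_of_mem _ ha)) j]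
      have h2 : (L + j) / L = j / L + 1 := by
        rw [Nat.add_comm, Nat.add_div_right _ hLpos]
      rw [h2, Nat.add_mod_left, List.getElem?_cons_succ]

theorem pvTable_get (m : Nat) (hm : m < 64000) :
    RAD50_TABLE[m]? =
      some (String.ofList ([RAD50_CHARS[m / 1600]!] ++ [RAD50_CHARS[m / 40 % 40]!] ++ [RAD50_CHARS[m % 40]!])) := by
  have hlen : RAD50_CHARS.length = 40 := by decide
  have hinner : ∀ a ∈ RAD50_CHARS,
      (RAD50_CHARS.flatMap (fun b => RAD50_CHARS.map (fun c => String.ofList [a, b, c]))).length = 1600 := by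
    intro a _
    simp [List.length_flatMap, List.length_map, hlen, List.map_const']
  rw [RAD50_TABLE, pvFlatMap_getElem? _ _ 1600 (by norm_num) hinner]
  rw [List.getElem?_eq_getElem (by omega : m / 1600 < RAD50_CHARS.length), Option.bind_some]
  rw [pvFlatMap_getElem? _ _ 40 (by norm_num) (fun b _ => by simp [hlen])]
  have e1 : m % 1600 / 40 = m / 40 % 40 := by omega
  have e2 : m % 1600 % 40 = m % 40 := by omega
  rw [e1, e2]
  rw [List.getElem?_eq_getElem (by omega : m / 40 % 40 < RAD50_CHARS.length), Option.bind_some]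
  rw [List.getElem?_map, List.getElem?_eq_getElem (by omega : m % 40 < RAD50_CHARS.length)]
  rw [getElem!_pos RAD50_CHARS _ (by omega), getElem!_pos RAD50_CHARS _ (by omega),
    getElem!_pos RAD50_CHARS _ (by omega)]
  rfl

-- link a Nat getElem! into the charset with the Int lookup helper
theorem pvLookup_eq (k : Nat) (hk : k < 40) :
    pvRadLookup (k : Int) = [RAD50_CHARS[k]!] := by
  have hlen : RAD50_CHARS.length = 40 := by decide
  rw [pvRadLookup, PySem.List.pyGet?_natCast, List.getElem?_eq_getElem (by omega),
    getElem!_pos RAD50_CHARS _ (by omega)]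

-- ===== VERDICT (by name: the statement is the Claim_ definition above) =====
theorem parse_radix50_spec : Claim_equal_parse_radix50 := by
  intro word _
  unfold Spec_parse_radix50 parse_radix50 parse_radix50_alt
  -- the B side: one table lookup at m = word % 64000
  rw [show PySem.Int.mod word 64000 = word % 64000 from
    PySem.Int.mod_eq_emod_of_pos (by norm_num)]
  have hm0 : 0 ≤ word % 64000 := Int.emod_nonneg word (by norm_num)
  have hm1 : word % 64000 < 64000 := Int.emod_lt_of_pos word (by norm_num)
  obtain ⟨m, hcast⟩ : ∃ m : Nat, word % 64000 = (m : Int) := ⟨(word % 64000).toNat, by omega⟩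
  have hmN : m < 64000 := by omega
  rw [hcast, PySem.List.pyGet?_natCast, pvTable_get m hmN, Option.getD_some]
  -- the three base-40 digits of word agree with those of m
  have d0 : PySem.Int.mod word 40 = ((m % 40 : Nat) : Int) := by
    rw [PySem.Int.mod_eq_emod_of_pos (by norm_num)]; omega
  have d1 : PySem.Int.mod (PySem.Int.floordiv word 40) 40 = ((m / 40 % 40 : Nat) : Int) := by
    rw [PySem.Int.floordiv_eq_ediv_of_pos (by norm_num),
        PySem.Int.mod_eq_emod_of_pos (by norm_num)]
    omega
  have d2 : PySem.Int.mod (PySem.Int.floordiv (PySem.Int.floordiv word 40) 40) 40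
      = ((m / 1600 : Nat) : Int) := by
    rw [PySem.Int.floordiv_eq_ediv_of_pos (by norm_num),
        PySem.Int.floordiv_eq_ediv_of_pos (by norm_num),
        PySem.Int.mod_eq_emod_of_pos (by norm_num)]
    omega
  by_cases hz : word = 0
  · obtain rfl : m = 0 := by subst hz; omega
    subst hz
    decide
  · simp only [beq_iff_eq, hz, if_false]
    have hrange : PySem.List.pyRange 0 3 1 = [0, 1, 2] := by decide
    rw [hrange]
    simp only [List.foldl_cons, List.foldl_nil, List.reverse_cons, List.reverse_nil,
      List.nil_append, List.cons_append]
    rw [pvBranchChar_eq_lookup _ (pvMod40_bounds word).1 (pvMod40_bounds word).2,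
      pvBranchChar_eq_lookup _ (pvMod40_bounds (PySem.Int.floordiv word 40)).1
        (pvMod40_bounds (PySem.Int.floordiv word 40)).2,
      pvBranchChar_eq_lookup _
        (pvMod40_bounds (PySem.Int.floordiv (PySem.Int.floordiv word 40) 40)).1
        (pvMod40_bounds (PySem.Int.floordiv (PySem.Int.floordiv word 40) 40)).2]
    rw [pvJoin_three, d0, d1, d2,
      pvLookup_eq _ (by omega), pvLookup_eq _ (by omega), pvLookup_eq _ (by omega)]
    rfl
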